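-- pv_equiv track=rewrite | github.com/mrap/boi | lib/status.py | _telem_to_iteration_list
-- ===== SOURCE A (Python) =====
-- from typing import Any
--
-- def _telem_to_iteration_list(telem: dict[str, Any]) -> list[dict[str, Any]]:
--     """Convert per-iteration arrays from telemetry.json to iteration dicts.
--
--     This bridges the telemetry file format (arrays of values per metric)
--     to the iteration list format used by format_telemetry_table.
--     """
--     completed = telem.get("tasks_completed_per_iteration", [])
--     added = telem.get("tasks_added_per_iteration", [])
--     skipped = telem.get("tasks_skipped_per_iteration", [])
--     count = max(len(completed), len(added), len(skipped))
--
--     result = []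
--     for i in range(count):
--         result.append(
--             {
--                 "iteration": i + 1,
--                 "tasks_completed": completed[i] if i < len(completed) else 0,
--                 "tasks_added": added[i] if i < len(added) else 0,
--                 "tasks_skipped": skipped[i] if i < len(skipped) else 0,
--                 "duration_seconds": 0,  # Not stored per-iteration in telemetry arrays
--                 "exit_code": 0,
--             }
--         )
--     return result
-- ===== SOURCE B (Python) =====
-- def _ensure_rows(rows, i):
--     while len(rows) <= i:
--         rows.append({
--             "iteration": len(rows) + 1,
--             "tasks_completed": 0,
--             "tasks_added": 0,
--             "tasks_skipped": 0,
--             "duration_seconds": 0,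
--             "exit_code": 0,
--         })
--
--
-- def _fill(rows, field, values):
--     for i, v in enumerate(values):
--         _ensure_rows(rows, i)
--         rows[i][field] = v
--
--
-- def _telem_to_iteration_list(telem):
--     rows = []
--     _fill(rows, "tasks_completed", telem.get("tasks_completed_per_iteration", []))
--     _fill(rows, "tasks_added", telem.get("tasks_added_per_iteration", []))
--     _fill(rows, "tasks_skipped", telem.get("tasks_skipped_per_iteration", []))
--     return rows
-- ===== Notes on version B (the rewrite author's own statement) =====
-- stated objective: alternative
-- what changed: Instead of one index loop over max(len) with three bounds-guarded subscripts per row, B lazily grows a list of zero-initialized rows and fills each metric column in its own separate pass that overwrites the field in already-built row dicts.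
import Mathlib
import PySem

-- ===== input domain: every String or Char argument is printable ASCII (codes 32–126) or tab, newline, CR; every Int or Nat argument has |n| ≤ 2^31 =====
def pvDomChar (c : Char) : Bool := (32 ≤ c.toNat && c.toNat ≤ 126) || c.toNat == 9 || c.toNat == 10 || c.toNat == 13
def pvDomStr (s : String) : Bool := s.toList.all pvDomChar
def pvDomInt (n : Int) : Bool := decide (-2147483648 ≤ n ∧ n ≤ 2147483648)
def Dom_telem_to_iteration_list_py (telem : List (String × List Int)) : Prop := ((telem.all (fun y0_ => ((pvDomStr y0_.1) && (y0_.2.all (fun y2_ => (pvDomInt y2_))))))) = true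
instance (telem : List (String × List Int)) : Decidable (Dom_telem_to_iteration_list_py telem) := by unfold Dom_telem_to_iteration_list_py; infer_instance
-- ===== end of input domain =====

-- B replaces A's single index loop (max length, three bounds-guarded subscripts per row)
-- by lazily growing zero-initialized rows and filling each metric column in its own pass
-- that overwrites the field in the already-built row dicts; return values are equal.

-- ===== PORT A =====
def telem_to_iteration_list_py (telem : List (String × List Int)) : List (List (String × Int)) :=
  let completed := PySem.Dict.getD (PySem.Dict.mk telem) "tasks_completed_per_iteration" []
  let added := PySem.Dict.getD (PySem.Dict.mk telem) "tasks_added_per_iteration" []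
  let skipped := PySem.Dict.getD (PySem.Dict.mk telem) "tasks_skipped_per_iteration" []
  let count : Int := max (max (completed.length : Int) (added.length : Int)) (skipped.length : Int)
  (PySem.List.pyRange 0 count 1).foldl
    (fun result i =>
      result ++
        [[("iteration", i + 1),
          ("tasks_completed", if i < (completed.length : Int) then PySem.List.pyGetD completed i 0 else 0),
          ("tasks_added", if i < (added.length : Int) then PySem.List.pyGetD added i 0 else 0),
          ("tasks_skipped", if i < (skipped.length : Int) then PySem.List.pyGetD skipped i 0 else 0),
          ("duration_seconds", 0),
          ("exit_code", 0)]])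
    []

-- ===== PORT B =====
-- Source B's zero row literal (dict in insertion order)
def pvZeroRow (n : Int) : List (String × Int) :=
  [("iteration", n), ("tasks_completed", 0), ("tasks_added", 0),
   ("tasks_skipped", 0), ("duration_seconds", 0), ("exit_code", 0)]

-- Source B's _ensure_rows: the while-loop that appends zero rows until len(rows) > i
def pvGrow (rows : List (List (String × Int))) (i : Nat) : List (List (String × Int)) :=
  if rows.length ≤ i then pvGrow (rows ++ [pvZeroRow ((rows.length : Int) + 1)]) i else rows
  termination_by i + 1 - rows.length
  decreasing_by simp; omega

-- Python's rows[i][field] = v on a dict that is a plain assoc list: overwrite the first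
-- occurrence of the key in place, else append (exact dict-assignment semantics)
def pvSetField (row : List (String × Int)) (k : String) (v : Int) : List (String × Int) :=
  match row with
  | [] => [(k, v)]
  | (k', v') :: rest => if k' == k then (k, v) :: rest else (k', v') :: pvSetField rest k v

-- Source B's _fill: for i, v in enumerate(values): _ensure_rows(rows, i); rows[i][field] = v
def pvFill (rows : List (List (String × Int))) (field : String) (values : List Int) :
    List (List (String × Int)) :=
  values.zipIdx.foldl
    (fun rows p =>
      let r := pvGrow rows p.2
      r.set p.2 (pvSetField (r.getD p.2 []) field p.1))
    rows

def telem_to_iteration_list_py_alt (telem : List (String × List Int)) : List (List (String × Int)) :=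
  let d := PySem.Dict.mk telem
  let rows0 : List (List (String × Int)) := []
  let rows1 := pvFill rows0 "tasks_completed" (PySem.Dict.getD d "tasks_completed_per_iteration" [])
  let rows2 := pvFill rows1 "tasks_added" (PySem.Dict.getD d "tasks_added_per_iteration" [])
  pvFill rows2 "tasks_skipped" (PySem.Dict.getD d "tasks_skipped_per_iteration" [])

-- ===== PRECONDITION & SPEC =====
def Spec_telem_to_iteration_list_py (telem : List (String × List Int)) (out : List (List (String × Int))) : Prop := out = telem_to_iteration_list_py_alt telem
instance (telem : List (String × List Int)) (out : List (List (String × Int))) : Decidable (Spec_telem_to_iteration_list_py telem out) := by unfold Spec_telem_to_iteration_list_py; infer_instance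

-- ===== CLAIM (what is proved, stated in full; the proofs are below) =====
def Claim_equal_telem_to_iteration_list_py : Prop := ∀ (telem : List (String × List Int)), Dom_telem_to_iteration_list_py telem → Spec_telem_to_iteration_list_py telem (telem_to_iteration_list_py telem)

-- ===== LEMMAS AND PROOFS =====

-- canonical row and canonical result
def pvRow (n c a s : Int) : List (String × Int) :=
  [("iteration", n), ("tasks_completed", c), ("tasks_added", a),
   ("tasks_skipped", s), ("duration_seconds", 0), ("exit_code", 0)]

def pvRows (c a s : List Int) : List (List (String × Int)) :=
  (List.range (max (max c.length a.length) s.length)).map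
    (fun (k : Nat) => pvRow ((k : Int) + 1) (c.getD k 0) (a.getD k 0) (s.getD k 0))

theorem pvZeroRow_eq (n : Int) : pvZeroRow n = pvRow n 0 0 0 := rfl

theorem setField_completed (n c a s v : Int) :
    pvSetField (pvRow n c a s) "tasks_completed" v = pvRow n v a s := by
  simp [pvSetField, pvRow]

theorem setField_added (n c a s v : Int) :
    pvSetField (pvRow n c a s) "tasks_added" v = pvRow n c v s := by
  simp [pvSetField, pvRow]

theorem setField_skipped (n c a s v : Int) :
    pvSetField (pvRow n c a s) "tasks_skipped" v = pvRow n c a v := by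
  simp [pvSetField, pvRow]

-- pvGrow on a range-shaped rows list extends it to length max m (i+1),
-- provided the shape function G produces the zero row beyond the current length
theorem grow_range (G : Nat → List (String × Int)) (m i : Nat)
    (hz : ∀ k, m ≤ k → G k = pvZeroRow ((k : Int) + 1)) :
    pvGrow ((List.range m).map G) i = (List.range (max m (i + 1))).map G := by
  by_cases h : m ≤ i
  · rw [pvGrow, if_pos (by simpa using h)]
    have happ : (List.range m).map G ++ [pvZeroRow (((((List.range m).map G).length : Nat) : Int) + 1)]
        = (List.range (m + 1)).map G := by
      simp only [List.length_map, List.length_range]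
      rw [(hz m le_rfl).symm, List.range_succ, List.map_append]; rfl
    rw [happ, grow_range G (m + 1) i (fun k hk => hz k (by omega))]
    have hmax : max (m + 1) (i + 1) = max m (i + 1) := by omega
    rw [hmax]
  · rw [pvGrow, if_neg (by simp [h])]
    have hmax : max m (i + 1) = m := by omega
    rw [hmax]
  termination_by i + 1 - m
  decreasing_by omega

-- List.set on a range-shaped list, expressed as a pointwise update of the shape function
theorem set_range_map (G : Nat → List (String × Int)) (M i : Nat) (r : List (String × Int)) :
    ((List.range M).map G).set i r
      = (List.range M).map (fun k => if k = i ∧ i < M then r else G k) := by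
  apply List.ext_getElem
  · simp
  · intro k hk hk'
    simp only [List.length_map, List.length_range] at hk'
    rw [List.getElem_set]
    simp only [List.getElem_map, List.getElem_range]
    by_cases h : i = k
    · subst h; simp [hk']
    · have h' : ¬ k = i := fun hh => h hh.symm
      simp [h, h']

-- one pass of pvFill on a range-shaped rows list
theorem fill_range (field : String) (xs : List Int) (m : Nat) (G : Nat → List (String × Int))
    (hz : ∀ k, m ≤ k → G k = pvZeroRow ((k : Int) + 1)) :
    pvFill ((List.range m).map G) field xs
      = (List.range (max m xs.length)).map
          (fun k => if k < xs.length then pvSetField (G k) field (xs.getD k 0) else G k) := by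
  induction xs using List.reverseRecOn with
  | nil =>
    simp only [pvFill, List.zipIdx_nil, List.foldl_nil, List.length_nil, Nat.max_zero]
    apply List.map_congr_left
    intro k _
    simp
  | append_singleton xs x ih =>
    rw [pvFill, List.zipIdx_append, List.foldl_append]
    rw [show (xs.zipIdx.foldl
      (fun rows p =>
        let r := pvGrow rows p.2
        r.set p.2 (pvSetField (r.getD p.2 []) field p.1)) ((List.range m).map G))
        = pvFill ((List.range m).map G) field xs from rfl, ih]
    set L := xs.length with hLdef
    set G' : Nat → List (String × Int) :=
      fun k => if k < L then pvSetField (G k) field (xs.getD k 0) else G k with hG'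
    have hz' : ∀ k, max m L ≤ k → G' k = pvZeroRow ((k : Int) + 1) := by
      intro k hk
      have h1 : ¬ k < L := by omega
      simp only [hG', h1, if_neg, not_false_eq_true]
      exact hz k (by omega)
    simp only [List.zipIdx_cons, List.zipIdx_nil, List.foldl_cons, List.foldl_nil, Nat.zero_add]
    rw [grow_range G' (max m L) L hz']
    have hLt : L < max (max m L) (L + 1) := by omega
    have hget : ((List.range (max (max m L) (L + 1))).map G').getD L [] = G' L := by
      rw [List.getD_eq_getElem?_getD, List.getElem?_eq_getElem (by simp)]
      simp
    rw [hget, set_range_map]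
    have hM : max (max m L) (L + 1) = max m (xs ++ [x]).length := by
      simp only [List.length_append, List.length_cons, List.length_nil]; omega
    rw [hM]
    apply List.map_congr_left
    intro k hk
    simp only [List.mem_range] at hk
    rcases eq_or_ne k L with h1 | h1
    · have hk' : L < max m (xs ++ [x]).length := h1 ▸ hk
      rw [if_pos ⟨h1, hk'⟩,
        if_pos (show k < (xs ++ [x]).length by
          simp only [List.length_append, List.length_cons, List.length_nil]; omega)]
      have hGL : G' L = G L := by simp [hG']
      have hk0 : k - xs.length = 0 := by omega
      have hxL : (xs ++ [x]).getD k 0 = x := by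
        rw [List.getD_eq_getElem?_getD, List.getElem?_append_right (by omega)]
        simp [hk0]
      have hxL' : (xs ++ [x]).getD L 0 = x := h1 ▸ hxL
      rw [h1, hGL, hxL']
    · rw [if_neg (fun hh => h1 hh.1)]
      by_cases h2 : k < L
      · rw [if_pos (show k < (xs ++ [x]).length by simp; omega)]
        have hx : (xs ++ [x]).getD k 0 = xs.getD k 0 := by
          rw [List.getD_eq_getElem?_getD, List.getElem?_append_left (by omega),
            ← List.getD_eq_getElem?_getD]
        rw [hx]
        simp only [hG', if_pos h2]
      · rw [if_neg (show ¬ k < (xs ++ [x]).length by simp; omega)]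
        simp only [hG', if_neg h2]

-- B computes the canonical rows
theorem b_eq_rows (c a s : List Int) :
    pvFill (pvFill (pvFill [] "tasks_completed" c) "tasks_added" a) "tasks_skipped" s
      = pvRows c a s := by
  have h0 : ([] : List (List (String × Int)))
      = (List.range 0).map (fun (k : Nat) => pvRow ((k : Int) + 1) 0 0 0) := rfl
  rw [h0, fill_range "tasks_completed" c 0 _ (fun k _ => (pvZeroRow_eq _).symm)]
  have e1 : (List.range (max 0 c.length)).map
      (fun (k : Nat) => if k < c.length
        then pvSetField (pvRow ((k : Int) + 1) 0 0 0) "tasks_completed" (c.getD k 0)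
        else pvRow ((k : Int) + 1) 0 0 0)
      = (List.range c.length).map (fun (k : Nat) => pvRow ((k : Int) + 1) (c.getD k 0) 0 0) := by
    rw [Nat.zero_max]
    apply List.map_congr_left
    intro k hk
    simp only [List.mem_range] at hk
    rw [if_pos hk, setField_completed]
  rw [e1, fill_range "tasks_added" a c.length _
    (fun k hk => by rw [List.getD_eq_default _ _ hk]; exact (pvZeroRow_eq _).symm)]
  have e2 : (List.range (max c.length a.length)).map
      (fun (k : Nat) => if k < a.length
        then pvSetField (pvRow ((k : Int) + 1) (c.getD k 0) 0 0) "tasks_added" (a.getD k 0)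
        else pvRow ((k : Int) + 1) (c.getD k 0) 0 0)
      = (List.range (max c.length a.length)).map
          (fun (k : Nat) => pvRow ((k : Int) + 1) (c.getD k 0) (a.getD k 0) 0) := by
    apply List.map_congr_left
    intro k _
    by_cases h : k < a.length
    · rw [if_pos h, setField_added]
    · rw [if_neg h, show a.getD k 0 = 0 from List.getD_eq_default _ _ (not_lt.mp h)]
  rw [e2, fill_range "tasks_skipped" s (max c.length a.length) _
    (fun k hk => by
      rw [List.getD_eq_default _ _ (by omega), List.getD_eq_default _ _ (by omega)]
      exact (pvZeroRow_eq _).symm)]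
  unfold pvRows
  apply List.map_congr_left
  intro k _
  by_cases h : k < s.length
  · rw [if_pos h, setField_skipped]
  · rw [if_neg h, show s.getD k 0 = 0 from List.getD_eq_default _ _ (not_lt.mp h)]

-- A computes the canonical rows
theorem a_eq_rows (c a s : List Int) :
    (PySem.List.pyRange 0 (max (max (c.length : Int) (a.length : Int)) (s.length : Int)) 1).foldl
      (fun result i =>
        result ++
          [[("iteration", i + 1),
            ("tasks_completed", if i < (c.length : Int) then PySem.List.pyGetD c i 0 else 0),
            ("tasks_added", if i < (a.length : Int) then PySem.List.pyGetD a i 0 else 0),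
            ("tasks_skipped", if i < (s.length : Int) then PySem.List.pyGetD s i 0 else 0),
            ("duration_seconds", (0:Int)),
            ("exit_code", (0:Int))]])
      [] = pvRows c a s := by
  rw [PySem.List.foldl_append_singleton_eq_map, List.nil_append, PySem.List.pyRange_one]
  have hN : ((max (max (c.length : Int) (a.length : Int)) (s.length : Int) - 0)).toNat
      = max (max c.length a.length) s.length := by omega
  rw [hN, List.map_map, pvRows]
  apply List.map_congr_left
  intro k hk
  simp only [List.mem_range] at hk
  have e1 : (if ((k:Int)) < (c.length : Int) then PySem.List.pyGetD c (k:Int) 0 else 0) = c.getD k 0 := by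
    split_ifs with h
    · simp
    · exact (List.getD_eq_default _ _ (by exact_mod_cast not_lt.mp h)).symm
  have e2 : (if ((k:Int)) < (a.length : Int) then PySem.List.pyGetD a (k:Int) 0 else 0) = a.getD k 0 := by
    split_ifs with h
    · simp
    · exact (List.getD_eq_default _ _ (by exact_mod_cast not_lt.mp h)).symm
  have e3 : (if ((k:Int)) < (s.length : Int) then PySem.List.pyGetD s (k:Int) 0 else 0) = s.getD k 0 := by
    split_ifs with h
    · simp
    · exact (List.getD_eq_default _ _ (by exact_mod_cast not_lt.mp h)).symm
  simp only [Function.comp_def, zero_add]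
  rw [e1, e2, e3]
  simp [pvRow]

-- ===== VERDICT (by name: the statement is the Claim_ definition above) =====
theorem telem_to_iteration_list_py_spec : Claim_equal_telem_to_iteration_list_py := by
  intro telem _
  unfold Spec_telem_to_iteration_list_py telem_to_iteration_list_py telem_to_iteration_list_py_alt
  rw [a_eq_rows, b_eq_rows]
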